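-- pv_equiv track=rewrite | github.com/eduardoscrs/EID-MAT1186 | Programa/core/rut.py | validar_rut_paso_a_paso
-- ===== SOURCE A (Python) =====
-- def validar_rut_paso_a_paso(rut_limpio):
--     """
--     Valida el RUT usando el Módulo 11 y retorna el paso a paso.
--     """
--     cuerpo = rut_limpio[:-1]
--     dv_ingresado = rut_limpio[-1]
--
--     pasos = []
--     pasos.append(f"1. RUT a validar (sin DV): {cuerpo}")
--
--     suma = 0
--     multiplicador = 2
--     pasos.append("2. Multiplicando dígitos de derecha a izquierda por la serie 2,3,4,5,6,7:")
--
--     for i in reversed(range(len(cuerpo))):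
--         digito = int(cuerpo[i])
--         producto = digito * multiplicador
--         suma += producto
--         pasos.append(f"   Dígito {digito} * {multiplicador} = {producto} (Suma parcial: {suma})")
--
--         multiplicador += 1
--         if multiplicador == 8:
--             multiplicador = 2
--
--     pasos.append(f"3. Suma total obtenida = {suma}")
--
--     resto = suma % 11
--     pasos.append(f"4. Calculando resto: {suma} % 11 = {resto}")
--
--     resultado_resta = 11 - resto
--     pasos.append(f"5. Calculando 11 - resto: 11 - {resto} = {resultado_resta}")
--
--     if resultado_resta == 11:
--         dv_calculado = '0'
--     elif resultado_resta == 10: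
--         dv_calculado = 'K'
--     else:
--         dv_calculado = str(resultado_resta)
--
--     pasos.append(f"6. Dígito verificador esperado = {dv_calculado}")
--
--     es_valido = (dv_calculado == dv_ingresado)
--     pasos.append(f"7. ¿Coincide el DV ingresado ({dv_ingresado}) con el calculado? {'Sí' if es_valido else 'No'}")
--
--     return es_valido, pasos, cuerpo, dv_ingresado
-- ===== SOURCE B (Python) =====
-- def validar_rut_paso_a_paso(rut_limpio):
--     cuerpo = rut_limpio[:-1]
--     dv_ingresado = rut_limpio[-1]
--     n = len(cuerpo)
--     # pass 1: left-to-right table of (digit, multiplier), multiplier in closed form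
--     # from the distance to the right end; products and their grand total
--     datos = [(int(c), 2 + (n - 1 - i) % 6) for i, c in enumerate(cuerpo)]
--     prods = [d * m for d, m in datos]
--     suma = sum(prods)
--     # pass 2: left-to-right, each line's "suma parcial" is the still-remaining
--     # suffix total; lines are built back-to-front and reversed once at the end
--     lineas = []
--     restante = suma
--     for (d, m), p in zip(datos, prods):
--         lineas.append(f"   Dígito {d} * {m} = {p} (Suma parcial: {restante})")
--         restante -= p
--     lineas.reverse()
--     resto = suma % 11
--     resultado_resta = 11 - resto
--     dv_calculado = '0K987654321'[resto]
--     es_valido = dv_calculado == dv_ingresado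
--     pasos = [f"1. RUT a validar (sin DV): {cuerpo}",
--              "2. Multiplicando dígitos de derecha a izquierda por la serie 2,3,4,5,6,7:"] \
--         + lineas \
--         + [f"3. Suma total obtenida = {suma}",
--            f"4. Calculando resto: {suma} % 11 = {resto}",
--            f"5. Calculando 11 - resto: 11 - {resto} = {resultado_resta}",
--            f"6. Dígito verificador esperado = {dv_calculado}",
--            f"7. ¿Coincide el DV ingresado ({dv_ingresado}) con el calculado? {'Sí' if es_valido else 'No'}"]
--     return es_valido, pasos, cuerpo, dv_ingresado
-- ===== Notes on version B (the rewrite author's own statement) =====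
-- stated objective: alternative
-- what changed: A's single right-to-left stateful loop (mutable suma, a multiplicador counter reset at 8, pasos appended as it goes) is replaced by two left-to-right passes: pass 1 builds the (digit, multiplier) table with the multiplier in closed form 2+((n-1-i)%6) and totals the products, pass 2 walks the products left-to-right emitting each trace line with the remaining suffix total and the whole line list is reversed once at the end; the DV comes from an 11-character lookup string instead of the if/elif chain.
import Mathlib
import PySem

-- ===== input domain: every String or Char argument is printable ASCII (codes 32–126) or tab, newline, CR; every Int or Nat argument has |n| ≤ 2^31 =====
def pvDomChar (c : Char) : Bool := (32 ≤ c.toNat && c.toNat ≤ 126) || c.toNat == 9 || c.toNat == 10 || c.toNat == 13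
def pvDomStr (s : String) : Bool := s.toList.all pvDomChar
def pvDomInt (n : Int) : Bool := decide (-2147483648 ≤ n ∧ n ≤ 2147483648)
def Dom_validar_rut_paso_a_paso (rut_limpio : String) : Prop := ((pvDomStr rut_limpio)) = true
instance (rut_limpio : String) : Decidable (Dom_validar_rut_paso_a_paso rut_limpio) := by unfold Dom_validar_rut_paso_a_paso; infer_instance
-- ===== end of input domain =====

-- B replaces A's single right-to-left stateful loop (suma, multiplicador with reset, pasos) by two
-- left-to-right passes: a (digit, closed-form multiplier) table with products and their total, then a
-- decreasing-remainder pass emitting trace lines back-to-front, reversed once; DV by table lookup.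
-- Alternative decomposition, not claimed faster.


-- formatting helpers shared by both ports (the f-string templates are character-identical in Source A and Source B)
def pvL1 (cuerpo : List Char) : String := String.mk ("1. RUT a validar (sin DV): ".toList ++ cuerpo)
def pvL2 : String := "2. Multiplicando dígitos de derecha a izquierda por la serie 2,3,4,5,6,7:"
def pvLDig (d m p s : Int) : String :=
  String.mk ("   Dígito ".toList ++ PySem.Int.toChars d ++ " * ".toList ++ PySem.Int.toChars m
    ++ " = ".toList ++ PySem.Int.toChars p ++ " (Suma parcial: ".toList ++ PySem.Int.toChars s ++ ")".toList)
def pvL3 (suma : Int) : String := String.mk ("3. Suma total obtenida = ".toList ++ PySem.Int.toChars suma)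
def pvL4 (suma resto : Int) : String :=
  String.mk ("4. Calculando resto: ".toList ++ PySem.Int.toChars suma ++ " % 11 = ".toList ++ PySem.Int.toChars resto)
def pvL5 (resto rr : Int) : String :=
  String.mk ("5. Calculando 11 - resto: 11 - ".toList ++ PySem.Int.toChars resto ++ " = ".toList ++ PySem.Int.toChars rr)
def pvL6 (dv : String) : String := String.mk ("6. Dígito verificador esperado = ".toList ++ dv.toList)
def pvL7 (dvIn : String) (ok : Bool) : String :=
  String.mk ("7. ¿Coincide el DV ingresado (".toList ++ dvIn.toList ++ ") con el calculado? ".toList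
    ++ (if ok then "Sí".toList else "No".toList))

-- ===== PORT A =====
def validar_rut_paso_a_paso (rut_limpio : String) : Bool × List String × String × String :=
  let cs := rut_limpio.toList
  let cuerpo := cs.dropLast                                    -- rut_limpio[:-1]
  let dv_ingresado : String := String.mk [(PySem.Chars.pyGet? cs (-1)).getD ' ']  -- rut_limpio[-1]; IndexError (empty) excluded by Pre_
  let pasos : List String := [pvL1 cuerpo, pvL2]
  -- for i in reversed(range(len(cuerpo))): state (suma, multiplicador, pasos)
  let st := ((PySem.List.pyRange 0 (cuerpo.length : Int) 1).reverse).foldl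
    (fun (st : Int × Int × List String) i =>
      let digito := (PySem.Int.ofChars? [PySem.List.pyGetD cuerpo i ' ']).getD 0  -- int(cuerpo[i]); ValueError excluded by Pre_
      let producto := digito * st.2.1
      let suma := st.1 + producto
      let ps := st.2.2 ++ [pvLDig digito st.2.1 producto suma]
      let mult := st.2.1 + 1
      (suma, (if mult = 8 then 2 else mult), ps))
    (0, 2, pasos)
  let suma := st.1
  let pasos := st.2.2 ++ [pvL3 suma]
  let resto := PySem.Int.mod suma 11
  let pasos := pasos ++ [pvL4 suma resto]
  let rr := 11 - resto
  let pasos := pasos ++ [pvL5 resto rr]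
  let dv_calculado : String := if rr = 11 then "0" else if rr = 10 then "K" else PySem.Int.toStr rr
  let pasos := pasos ++ [pvL6 dv_calculado]
  let es_valido := dv_calculado == dv_ingresado
  let pasos := pasos ++ [pvL7 dv_ingresado es_valido]
  (es_valido, pasos, String.mk cuerpo, dv_ingresado)

-- ===== PORT B =====
def validar_rut_paso_a_paso_alt (rut_limpio : String) : Bool × List String × String × String :=
  let cs := rut_limpio.toList
  let cuerpo := cs.dropLast
  let dv_ingresado : String := String.mk [(PySem.Chars.pyGet? cs (-1)).getD ' ']
  let n : Int := cuerpo.length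
  -- datos = [(int(c), 2 + (n - 1 - i) % 6) for i, c in enumerate(cuerpo)]
  let datos := (PySem.List.enumerate cuerpo 0).map
    (fun p => ((PySem.Int.ofChars? [p.2]).getD 0, 2 + PySem.Int.mod (n - 1 - p.1) 6))
  let prods := datos.map (fun dm => dm.1 * dm.2)
  let suma := prods.foldl (· + ·) 0                            -- sum(prods)
  -- for (d, m), p in zip(datos, prods): append line with restante; restante -= p;  then reverse
  let st := (datos.zip prods).foldl
    (fun (st : Int × List String) q => (st.1 - q.2, st.2 ++ [pvLDig q.1.1 q.1.2 q.2 st.1])) (suma, [])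
  let lineas := st.2.reverse
  let resto := PySem.Int.mod suma 11
  let rr := 11 - resto
  let dv_calculado : String := String.mk [(PySem.Chars.pyGet? "0K987654321".toList resto).getD ' ']
  let es_valido := dv_calculado == dv_ingresado
  let pasos : List String :=
    [pvL1 cuerpo, pvL2] ++ lineas
    ++ [pvL3 suma, pvL4 suma resto, pvL5 resto rr, pvL6 dv_calculado, pvL7 dv_ingresado es_valido]
  (es_valido, pasos, String.mk cuerpo, dv_ingresado)

-- ===== PRECONDITION & SPEC =====
-- Pre_ excludes exactly the inputs where the Python A raises: the empty string (IndexError on rut_limpio[-1])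
-- and any body character that is not a decimal digit (ValueError from int(cuerpo[i])).
def Pre_validar_rut_paso_a_paso (rut_limpio : String) : Prop :=
  rut_limpio.toList ≠ [] ∧ rut_limpio.toList.dropLast.all (fun c => c.isDigit) = true
instance (rut_limpio : String) : Decidable (Pre_validar_rut_paso_a_paso rut_limpio) := by
  unfold Pre_validar_rut_paso_a_paso; infer_instance
def pvWitness_validar_rut_paso_a_paso : String := "19"
def Spec_validar_rut_paso_a_paso (rut_limpio : String) (out : Bool × List String × String × String) : Prop := out = validar_rut_paso_a_paso_alt rut_limpio
instance (rut_limpio : String) (out : Bool × List String × String × String) : Decidable (Spec_validar_rut_paso_a_paso rut_limpio out) := by unfold Spec_validar_rut_paso_a_paso; infer_instance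

-- ===== CLAIM (what is proved, stated in full; the proofs are below) =====
def Claim_equal_validar_rut_paso_a_paso : Prop := ∀ (rut_limpio : String), Dom_validar_rut_paso_a_paso rut_limpio → Pre_validar_rut_paso_a_paso rut_limpio → Spec_validar_rut_paso_a_paso rut_limpio (validar_rut_paso_a_paso rut_limpio)

-- ===== LEMMAS AND PROOFS =====

-- digit value of a character
def pvDig (c : Char) : Int := (PySem.Int.ofChars? [c]).getD 0

-- (digit, multiplier) pairs along the REVERSED body, k = distance from the right end
def pvQ : List Char → Nat → List (Int × Int)
  | [], _ => []
  | c :: t, k => (pvDig c, 2 + ((k % 6 : Nat) : Int)) :: pvQ t (k + 1)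

-- total of the products
def pvT (rs : List Char) (k : Nat) : Int := ((pvQ rs k).map (fun dm => dm.1 * dm.2)).sum

-- trace lines (A's emission order), parametrized by the grand total R of the whole suffix
def pvStepR : List Char → Nat → Int → List String
  | [], _, _ => []
  | c :: t, k, R =>
    pvLDig (pvDig c) (2 + ((k % 6 : Nat) : Int)) (pvDig c * (2 + ((k % 6 : Nat) : Int))) (R - pvT t (k + 1))
      :: pvStepR t (k + 1) R

theorem pv_mult_step (k : Nat) :
    (if 2 + ((k % 6 : Nat) : Int) + 1 = 8 then (2 : Int) else 2 + ((k % 6 : Nat) : Int) + 1)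
      = 2 + (((k + 1) % 6 : Nat) : Int) := by
  have h : k % 6 < 6 := Nat.mod_lt _ (by norm_num)
  by_cases h5 : k % 6 = 5
  · have : (k + 1) % 6 = 0 := by omega
    simp [h5, this]
  · have : (k + 1) % 6 = k % 6 + 1 := by omega
    rw [if_neg (by push_cast; omega), this]
    push_cast; ring

-- A's loop over the reversed body, characterized by total + lines
theorem pvA_loop (rs : List Char) (k : Nat) (s : Int) (ps : List String) :
    rs.foldl
      (fun (st : Int × Int × List String) c =>
        let digito := pvDig c
        let producto := digito * st.2.1
        let suma := st.1 + producto
        let ps := st.2.2 ++ [pvLDig digito st.2.1 producto suma]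
        let mult := st.2.1 + 1
        (suma, (if mult = 8 then 2 else mult), ps))
      (s, 2 + ((k % 6 : Nat) : Int), ps)
    = (s + pvT rs k, 2 + (((k + rs.length) % 6 : Nat) : Int), ps ++ pvStepR rs k (s + pvT rs k)) := by
  induction rs generalizing k s ps with
  | nil => simp [pvT, pvQ, pvStepR]
  | cons c rs' ih =>
    simp only [List.foldl_cons]
    rw [pv_mult_step k, ih (k + 1)]
    have hT : pvT (c :: rs') k = pvDig c * (2 + ((k % 6 : Nat) : Int)) + pvT rs' (k + 1) := by
      simp [pvT, pvQ]
    have hR : s + pvT (c :: rs') k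
        = s + pvDig c * (2 + ((k % 6 : Nat) : Int)) + pvT rs' (k + 1) := by rw [hT]; ring
    have h2 : s + pvDig c * (2 + ((k % 6 : Nat) : Int)) + pvT rs' (k + 1) - pvT rs' (k + 1)
        = s + pvDig c * (2 + ((k % 6 : Nat) : Int)) := by ring
    have hlen : k + 1 + rs'.length = k + (c :: rs').length := by
      simp only [List.length_cons]; omega
    simp only [hR, hlen, pvStepR, h2, List.append_assoc, List.cons_append, List.nil_append]

theorem pvA_index_loop_gen (xs : List Char) (f : (Int × Int × List String) → Char → (Int × Int × List String)) (init : Int × Int × List String) :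
    ((PySem.List.pyRange 0 (xs.length : Int) 1).reverse).foldl
      (fun st i => f st (PySem.List.pyGetD xs i ' ')) init
    = xs.reverse.foldl f init := by
  rw [← List.foldl_map, List.map_reverse]
  have h : (PySem.List.pyRange 0 (xs.length : Int) 1).map (fun i => PySem.List.pyGetD xs i ' ') = xs :=
    PySem.List.map_pyGetD_pyRange_zero xs ' '
  rw [h]

theorem pvA_index_loop (xs : List Char) (init : Int × Int × List String) :
    ((PySem.List.pyRange 0 (xs.length : Int) 1).reverse).foldl
      (fun (st : Int × Int × List String) i =>
        (st.1 + (PySem.Int.ofChars? [PySem.List.pyGetD xs i ' ']).getD 0 * st.2.1,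
          if st.2.1 + 1 = 8 then 2 else st.2.1 + 1,
          st.2.2 ++
            [pvLDig ((PySem.Int.ofChars? [PySem.List.pyGetD xs i ' ']).getD 0) st.2.1
                ((PySem.Int.ofChars? [PySem.List.pyGetD xs i ' ']).getD 0 * st.2.1)
                (st.1 + (PySem.Int.ofChars? [PySem.List.pyGetD xs i ' ']).getD 0 * st.2.1)])) init
    = xs.reverse.foldl
      (fun (st : Int × Int × List String) c =>
        let digito := pvDig c
        let producto := digito * st.2.1
        let suma := st.1 + producto
        let ps := st.2.2 ++ [pvLDig digito st.2.1 producto suma]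
        let mult := st.2.1 + 1
        (suma, (if mult = 8 then 2 else mult), ps)) init :=
  pvA_index_loop_gen xs
    (fun (st : Int × Int × List String) c =>
      (st.1 + pvDig c * st.2.1,
        if st.2.1 + 1 = 8 then 2 else st.2.1 + 1,
        st.2.2 ++ [pvLDig (pvDig c) st.2.1 (pvDig c * st.2.1) (st.1 + pvDig c * st.2.1)])) init

-- pvQ over a snoc
theorem pvQ_snoc (xs : List Char) (c : Char) (k : Nat) :
    pvQ (xs ++ [c]) k = pvQ xs k ++ [(pvDig c, 2 + (((k + xs.length) % 6 : Nat) : Int))] := by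
  induction xs generalizing k with
  | nil => simp [pvQ]
  | cons x t ih =>
    simp only [List.cons_append, pvQ, ih (k + 1), List.length_cons]
    congr 4
    omega

-- B's datos list equals pvQ of the reversed body, reversed
theorem pv_datos_eq (L : List Char) (j k : Nat) (n : Int) (hn : n = (j : Int) + L.length + k) :
    (PySem.List.enumerate L (j : Int)).map
        (fun p => ((PySem.Int.ofChars? [p.2]).getD 0, 2 + PySem.Int.mod (n - 1 - p.1) 6))
      = (pvQ L.reverse k).reverse := by
  induction L generalizing j with
  | nil => simp [pvQ]
  | cons c t ih =>
    rw [PySem.List.enumerate_cons, List.map_cons]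
    have hj : ((j : Int) + 1) = ((j + 1 : Nat) : Int) := by push_cast; ring
    rw [hj, ih (j + 1) (by simp at hn ⊢; omega)]
    have hrev : (c :: t).reverse = t.reverse ++ [c] := by simp
    rw [hrev, pvQ_snoc, List.reverse_append]
    have hval : n - 1 - (j : Int) = ((k + t.reverse.length : Nat) : Int) := by
      simp at hn ⊢; omega
    rw [hval]
    simp [pvDig]

-- folding (+) from any seed is the seed plus the sum
theorem pv_foldl_add (l : List Int) (c : Int) : l.foldl (· + ·) c = c + l.sum := by
  induction l generalizing c with
  | nil => simp
  | cons x t ih => simp [ih]; ring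

-- B's line-building foldr over pvQ
theorem pv_foldr_lines (rs : List Char) (k : Nat) (R : Int) (acc : List String) :
    (pvQ rs k).foldr
      (fun x (st : Int × List String) => (st.1 - x.1 * x.2, st.2 ++ [pvLDig x.1 x.2 (x.1 * x.2) st.1]))
      (R, acc)
    = (R - pvT rs k, acc ++ (pvStepR rs k R).reverse) := by
  induction rs generalizing k with
  | nil => simp [pvQ, pvT, pvStepR]
  | cons c t ih =>
    simp only [pvQ, List.foldr_cons, ih (k + 1), pvStepR, List.reverse_cons]
    have hT : pvT (c :: t) k = pvDig c * (2 + ((k % 6 : Nat) : Int)) + pvT t (k + 1) := by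
      simp [pvT, pvQ]
    simp only [Prod.mk.injEq]
    exact ⟨by rw [hT]; ring, by simp [List.append_assoc]⟩

-- B's suma expression collapses to the grand total
theorem pv_suma (rs : List Char) (k : Nat) :
    ((pvQ rs k).reverse.map (fun dm => dm.1 * dm.2)).foldl (· + ·) 0 = pvT rs k := by
  rw [List.map_reverse, pv_foldl_add, List.sum_reverse, zero_add, pvT]

-- B's zip-and-fold trace pass, in the port's exact shape
theorem pv_B_trace (rs : List Char) (k : Nat) (R : Int) :
    ((pvQ rs k).reverse.zip ((pvQ rs k).reverse.map (fun dm => dm.1 * dm.2))).foldl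
      (fun (st : Int × List String) x => (st.1 - x.2, st.2 ++ [pvLDig x.1.1 x.1.2 x.2 st.1])) (R, [])
    = (R - pvT rs k, (pvStepR rs k R).reverse) := by
  have hz : ∀ (l : List (Int × Int)),
      l.zip (l.map (fun dm => dm.1 * dm.2)) = l.map (fun x => (x, x.1 * x.2)) := by
    intro l; induction l with
    | nil => simp
    | cons a t ih => simp [ih]
  rw [hz, List.foldl_map, List.foldl_reverse]
  simpa using pv_foldr_lines rs k R []

theorem pv_dv_table (r : Int) (h0 : 0 ≤ r) (h1 : r < 11) :
    (if 11 - r = 11 then "0" else if 11 - r = 10 then "K" else PySem.Int.toStr (11 - r))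
      = String.mk [(PySem.Chars.pyGet? "0K987654321".toList r).getD ' '] := by
  interval_cases r <;> decide

-- ===== VERDICT (by name: the statement is the Claim_ definition above) =====
theorem validar_rut_paso_a_paso_spec : Claim_equal_validar_rut_paso_a_paso := by
  intro rut _ _
  unfold Spec_validar_rut_paso_a_paso validar_rut_paso_a_paso validar_rut_paso_a_paso_alt
  dsimp only
  set L := rut.toList.dropLast with hL
  -- A side
  rw [pvA_index_loop]
  have hA := pvA_loop L.reverse 0 0 [pvL1 L, pvL2]
  simp only [Nat.zero_mod, Nat.cast_zero, add_zero, zero_add] at hA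
  rw [hA]
  dsimp only
  -- B side: datos
  have hD := pv_datos_eq L 0 0 (L.length : Int) (by push_cast; ring)
  simp only [Nat.cast_zero] at hD
  rw [hD, pv_suma L.reverse 0, pv_B_trace L.reverse 0 (pvT L.reverse 0)]
  dsimp only
  rw [List.reverse_reverse]
  -- dv
  have hdv := pv_dv_table (PySem.Int.mod (pvT L.reverse 0) 11)
    (PySem.Int.mod_nonneg _ (by norm_num)) (PySem.Int.mod_lt _ (by norm_num))
  rw [hdv]
  simp [List.append_assoc]
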